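-- pv_equiv track=rewrite | github.com/TransluceAI/docent | lib/lucepkg/lucepkg/commands/setup.py | _update_ssh_config
-- ===== SOURCE A (Python) =====
-- def _update_ssh_config(old_config: str, host: str, new_block: str) -> str:
--     """Update SSH config, replacing existing Host block if it exists.
--
--     Note: Not well tested; don't use without looking at the output first!
--
--     Args:
--         old_config: Existing SSH config contents
--         host: Host to look for (exact match after "Host ")
--         new_block: New config block to insert
--
--     Returns:
--         Updated SSH config contents with original formatting preserved
--     """
--     lines = old_config.splitlines()
--     result: list[str] = []
--     i = 0
--     found = False
--
--     while i < len(lines):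
--         # Check for Host or Match directive, ignoring whitespace
--         if lines[i].strip().startswith(("Host ", "Match ")):
--             if lines[i].strip() == f"Host {host}":
--                 # Found our host - skip the old block
--                 found = True
--                 while i < len(lines):
--                     if i == len(lines) - 1 or lines[i + 1].strip().startswith(("Host ", "Match ")):
--                         break
--                     i += 1
--                 # Insert new block
--                 result.append(new_block)
--                 result.append("")
--             else:
--                 # Different host - keep original line
--                 result.append(lines[i])
--         else:
--             # Keep original line
--             result.append(lines[i])
--         i += 1
--
--     # If we didn't find the host, add the new block at the end
--     if not found:
--         if result and result[-1] != "":
--             result.append("")  # Add blank line before new block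
--         result.append(new_block)
--
--     return "\n".join(result)
-- ===== SOURCE B (Python) =====
-- def _update_ssh_config(old_config: str, host: str, new_block: str) -> str:
--     lines = old_config.splitlines()
--     target = f"Host {host}"
--
--     def is_directive(line: str) -> bool:
--         return line.strip().startswith(("Host ", "Match "))
--
--     # Partition the lines into a leading segment (before any directive) and
--     # one segment per directive line (running up to the next directive).
--     segments: list[list[str]] = [[]]
--     for line in lines:
--         if is_directive(line):
--             segments.append([line])
--         else:
--             segments[-1].append(line)
--
--     result: list[str] = list(segments[0])
--     found = False
--     for seg in segments[1:]:
--         if seg[0].strip() == target: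
--             found = True
--             result.append(new_block)
--             result.append("")
--         else:
--             result.extend(seg)
--
--     if not found:
--         if result and result[-1] != "":
--             result.append("")
--         result.append(new_block)
--     return "\n".join(result)
-- ===== Notes on version B (the rewrite author's own statement) =====
-- stated objective: alternative
-- what changed: B first partitions the splitlines output into a leading segment plus one segment per Host/Match directive line, then emits segments (replacing every segment whose header strips to 'Host <host>'), instead of A's index-driven while loop with an inner skip loop.
import Mathlib
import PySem

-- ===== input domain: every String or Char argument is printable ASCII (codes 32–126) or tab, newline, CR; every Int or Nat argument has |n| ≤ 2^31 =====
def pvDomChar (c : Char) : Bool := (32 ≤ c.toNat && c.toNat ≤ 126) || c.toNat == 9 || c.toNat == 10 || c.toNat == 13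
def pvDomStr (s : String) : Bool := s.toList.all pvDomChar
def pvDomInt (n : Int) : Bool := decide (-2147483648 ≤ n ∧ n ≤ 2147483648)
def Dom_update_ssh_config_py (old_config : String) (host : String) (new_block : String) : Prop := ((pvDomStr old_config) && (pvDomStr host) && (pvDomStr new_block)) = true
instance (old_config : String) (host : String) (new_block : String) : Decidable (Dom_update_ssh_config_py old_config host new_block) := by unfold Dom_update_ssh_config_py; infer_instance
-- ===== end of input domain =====

-- B replaces A's index-driven while loop (with inner skip loop) by a partition of the
-- lines into directive-headed segments followed by a segment-emission pass; objective:
-- alternative decomposition, same complexity, provably the same return value.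


-- ===== PORT A =====
-- inner `while` of A: advance i until it is the last index or the next line is a directive
def uscA_skip (lines : List String) (i : Nat) : Nat :=
  if _h : i < lines.length then
    if i == lines.length - 1
        || (PySem.Str.startswith (PySem.Str.strip (lines.getD (i+1) "")) "Host "
            || PySem.Str.startswith (PySem.Str.strip (lines.getD (i+1) "")) "Match ") then
      i
    else uscA_skip lines (i+1)
  else i
termination_by lines.length - i

-- (termination helper for the outer loop, cited by `decreasing_by`)
theorem uscA_skip_ge (lines : List String) (i : Nat) : i ≤ uscA_skip lines i := by
  unfold uscA_skip
  split
  · split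
    · exact le_refl i
    · have := uscA_skip_ge lines (i+1); omega
  · exact le_refl i
termination_by lines.length - i

-- outer `while` of A
def uscA_loop (lines : List String) (nb t : String) (i : Nat)
    (result : List String) (found : Bool) : List String × Bool :=
  if _h : i < lines.length then
    if PySem.Str.startswith (PySem.Str.strip (lines.getD i "")) "Host "
        || PySem.Str.startswith (PySem.Str.strip (lines.getD i "")) "Match " then
      if PySem.Str.strip (lines.getD i "") == t then
        uscA_loop lines nb t (uscA_skip lines i + 1) (result ++ [nb, ""]) true
      else
        uscA_loop lines nb t (i+1) (result ++ [lines.getD i ""]) found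
    else
      uscA_loop lines nb t (i+1) (result ++ [lines.getD i ""]) found
  else (result, found)
termination_by lines.length - i
decreasing_by
  · have := uscA_skip_ge lines i; omega
  · omega
  · omega

def update_ssh_config_py (old_config : String) (host : String) (new_block : String) : String :=
  let lines := PySem.Str.splitlines old_config
  let res := uscA_loop lines new_block ("Host " ++ host) 0 [] false
  let result := res.1
  let found := res.2
  let result :=
    if found then result
    else
      (if (match result.getLast? with | some l => l != "" | none => false)
       then result ++ [""] else result) ++ [new_block]
  PySem.Str.join "\n" result

-- ===== PORT B =====
def uscB_isDirective (line : String) : Bool :=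
  PySem.Str.startswith (PySem.Str.strip line) "Host "
    || PySem.Str.startswith (PySem.Str.strip line) "Match "

-- partition pass of B: finished segments `segs`, current segment `cur`
def uscB_segment : List String → List (List String) → List String → List (List String)
  | [], segs, cur => segs ++ [cur]
  | l :: ls, segs, cur =>
    if uscB_isDirective l then uscB_segment ls (segs ++ [cur]) [l]
    else uscB_segment ls segs (cur ++ [l])

def update_ssh_config_py_alt (old_config : String) (host : String) (new_block : String) : String :=
  let target := "Host " ++ host
  let segments := uscB_segment (PySem.Str.splitlines old_config) [] []
  let res := (segments.drop 1).foldl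
    (fun acc seg =>
      if PySem.Str.strip (seg.headD "") == target then (acc.1 ++ [new_block, ""], true)
      else (acc.1 ++ seg, acc.2))
    (segments.headD [], false)
  let result := res.1
  let found := res.2
  let result :=
    if found then result
    else
      (if (match result.getLast? with | some l => l != "" | none => false)
       then result ++ [""] else result) ++ [new_block]
  PySem.Str.join "\n" result

-- ===== PRECONDITION & SPEC =====
def Spec_update_ssh_config_py (old_config : String) (host : String) (new_block : String) (out : String) : Prop := out = update_ssh_config_py_alt old_config host new_block
instance (old_config : String) (host : String) (new_block : String) (out : String) : Decidable (Spec_update_ssh_config_py old_config host new_block out) := by unfold Spec_update_ssh_config_py; infer_instance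

-- ===== CLAIM (what is proved, stated in full; the proofs are below) =====
def Claim_equal_update_ssh_config_py : Prop := ∀ (old_config : String) (host : String) (new_block : String), Dom_update_ssh_config_py old_config host new_block → Spec_update_ssh_config_py old_config host new_block (update_ssh_config_py old_config host new_block)

-- ===== LEMMAS AND PROOFS =====

-- canonical form both loops are proved equal to
def uscCanon (nb t : String) : List String → List String
  | [] => []
  | l :: ls =>
    if uscB_isDirective l && (PySem.Str.strip l == t) then
      nb :: "" :: uscCanon nb t (ls.dropWhile (fun x => !uscB_isDirective x))
    else l :: uscCanon nb t ls
termination_by ls => ls.length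
decreasing_by
  · have := List.length_dropWhile_le (fun x => !uscB_isDirective x) ls
    simp only [List.length_cons]; omega
  · simp only [List.length_cons]; omega

def uscAny (t : String) (ls : List String) : Bool :=
  ls.any (fun l => uscB_isDirective l && (PySem.Str.strip l == t))

theorem uscCanon_nondir_append (nb t : String) (pre rest : List String)
    (h : ∀ x ∈ pre, uscB_isDirective x = false) :
    uscCanon nb t (pre ++ rest) = pre ++ uscCanon nb t rest ∧
      uscAny t (pre ++ rest) = uscAny t rest := by
  induction pre with
  | nil => simp
  | cons a pre ih =>
    have ha : uscB_isDirective a = false := h a (by simp)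
    have ih' := ih (fun x hx => h x (by simp [hx]))
    constructor
    · rw [List.cons_append, uscCanon, ha]
      simp [ih'.1]
    · simp [uscAny, ha] at ih' ⊢
      exact ih'.2

theorem uscHead_dropWhile {p : String → Bool} {l : List String} {x : String}
    (h : (l.dropWhile p).head? = some x) : p x = false := by
  induction l with
  | nil => simp at h
  | cons a l ih =>
    rw [List.dropWhile_cons] at h
    split at h
    · exact ih h
    · simp_all

-- ---- A side ----
theorem uscA_skip_drop (lines : List String) (i : Nat) (h : i < lines.length) :
    lines.drop (uscA_skip lines i + 1)
      = (lines.drop (i+1)).dropWhile (fun x => !uscB_isDirective x) := by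
  rw [uscA_skip, dif_pos h]
  by_cases h2 : i + 1 < lines.length
  · have hne : (i == lines.length - 1) = false := by
      simp only [beq_eq_false_iff_ne]; omega
    have hcons : lines.drop (i+1) = lines[i+1] :: lines.drop (i+2) :=
      List.drop_eq_getElem_cons h2
    have hgetD : lines.getD (i+1) "" = lines[i+1] := List.getD_eq_getElem lines "" h2
    by_cases hd : uscB_isDirective lines[i+1]
    · have : (PySem.Str.startswith (PySem.Str.strip (lines.getD (i+1) "")) "Host "
          || PySem.Str.startswith (PySem.Str.strip (lines.getD (i+1) "")) "Match ") = true := by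
        rw [hgetD]; exact hd
      rw [hne, Bool.false_or, this, if_pos rfl, hcons, List.dropWhile_cons]
      simp [hd]
    · have hexpr : (PySem.Str.startswith (PySem.Str.strip (lines.getD (i+1) "")) "Host "
          || PySem.Str.startswith (PySem.Str.strip (lines.getD (i+1) "")) "Match ") = false := by
        rw [hgetD]; exact eq_false_of_ne_true hd
      rw [hne, Bool.false_or, hexpr, if_neg (by simp)]
      rw [uscA_skip_drop lines (i+1) h2, hcons, List.dropWhile_cons]
      simp [hd]
  · have : lines.drop (i+1) = [] := List.drop_eq_nil_of_le (by omega)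
    have heq : (i == lines.length - 1) = true := by
      simp only [beq_iff_eq]; omega
    rw [heq, Bool.true_or, if_pos rfl, this]
    simp
termination_by lines.length - i

theorem uscA_loop_eq (lines : List String) (nb t : String) :
    ∀ (n : Nat), ∀ (i : Nat) (result : List String) (found : Bool), lines.length - i ≤ n →
      uscA_loop lines nb t i result found
        = (result ++ uscCanon nb t (lines.drop i), found || uscAny t (lines.drop i)) := by
  intro n
  induction n with
  | zero =>
    intro i result found hn
    have hi : ¬ i < lines.length := by omega
    rw [uscA_loop, dif_neg hi]
    have hnil : lines.drop i = [] := List.drop_eq_nil_of_le (by omega)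
    simp [hnil, uscCanon, uscAny]
  | succ n ih =>
    intro i result found hn
    rw [uscA_loop]
    by_cases hi : i < lines.length
    · rw [dif_pos hi]
      have hcons : lines.drop i = lines[i] :: lines.drop (i+1) := List.drop_eq_getElem_cons hi
      have hgetD : lines.getD i "" = lines[i] := List.getD_eq_getElem lines "" hi
      rw [hgetD]
      have hrw : (PySem.Str.startswith (PySem.Str.strip lines[i]) "Host "
          || PySem.Str.startswith (PySem.Str.strip lines[i]) "Match ")
          = uscB_isDirective lines[i] := rfl
      rw [hrw, hcons]
      by_cases hd : uscB_isDirective lines[i] = true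
      · rw [if_pos hd]
        by_cases hm : (PySem.Str.strip lines[i] == t) = true
        · rw [if_pos hm]
          have hskip := uscA_skip_ge lines i
          rw [ih (uscA_skip lines i + 1) (result ++ [nb, ""]) true (by omega)]
          rw [uscA_skip_drop lines i hi]
          rw [uscCanon, if_pos (by simp [hd, hm])]
          simp only [uscAny, List.any_cons]
          simp [hd, hm]
        · rw [if_neg hm]
          rw [ih (i+1) (result ++ [lines[i]]) found (by omega)]
          rw [uscCanon, if_neg (by simp [hm])]
          simp only [uscAny, List.any_cons]
          simp [hm]
      · rw [if_neg hd]
        rw [ih (i+1) (result ++ [lines[i]]) found (by omega)]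
        rw [uscCanon, if_neg (by simp [hd])]
        simp only [uscAny, List.any_cons]
        simp [hd]
    · rw [dif_neg hi]
      have hnil : lines.drop i = [] := List.drop_eq_nil_of_le (by omega)
      simp [hnil, uscCanon, uscAny]

-- ---- B side ----
-- segments of a list whose head (if any) is a directive
def uscDirSegs : List String → List (List String)
  | [] => []
  | l :: ls =>
    (l :: ls.takeWhile (fun x => !uscB_isDirective x))
      :: uscDirSegs (ls.dropWhile (fun x => !uscB_isDirective x))
termination_by ls => ls.length
decreasing_by
  have := List.length_dropWhile_le (fun x => !uscB_isDirective x) ls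
  simp only [List.length_cons]; omega

theorem uscB_segment_eq (ls : List String) : ∀ (segs : List (List String)) (cur : List String),
    uscB_segment ls segs cur
      = segs ++ ((cur ++ ls.takeWhile (fun x => !uscB_isDirective x))
          :: uscDirSegs (ls.dropWhile (fun x => !uscB_isDirective x))) := by
  induction ls with
  | nil => intro segs cur; simp [uscB_segment, uscDirSegs]
  | cons l ls ih =>
    intro segs cur
    rw [uscB_segment]
    by_cases hl : uscB_isDirective l
    · rw [if_pos hl, ih]
      simp [hl, uscDirSegs]
    · rw [if_neg hl, ih]
      simp [hl]

theorem uscB_fold_eq (nb t : String) :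
    ∀ (n : Nat), ∀ (ls : List String) (acc : List String) (found : Bool), ls.length ≤ n →
      (∀ x, ls.head? = some x → uscB_isDirective x = true) →
      (uscDirSegs ls).foldl
        (fun acc seg =>
          if PySem.Str.strip (seg.headD "") == t then (acc.1 ++ [nb, ""], true)
          else (acc.1 ++ seg, acc.2)) (acc, found)
        = (acc ++ uscCanon nb t ls, found || uscAny t ls) := by
  intro n
  induction n with
  | zero =>
    intro ls acc found hn _
    have : ls = [] := List.eq_nil_of_length_eq_zero (by omega)
    subst this
    simp [uscDirSegs, uscCanon, uscAny]
  | succ n ih =>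
    intro ls acc found hn hhead
    cases ls with
    | nil => simp [uscDirSegs, uscCanon, uscAny]
    | cons l ls' =>
      have hd : uscB_isDirective l = true := hhead l rfl
      have hnd : ∀ x ∈ ls'.takeWhile (fun x => !uscB_isDirective x), uscB_isDirective x = false := by
        intro x hx
        have := List.mem_takeWhile_imp hx
        simpa using this
      have hcform := uscCanon_nondir_append nb t
        (ls'.takeWhile (fun x => !uscB_isDirective x))
        (ls'.dropWhile (fun x => !uscB_isDirective x)) hnd
      have hsplit : ls'.takeWhile (fun x => !uscB_isDirective x)
          ++ ls'.dropWhile (fun x => !uscB_isDirective x) = ls' :=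
        List.takeWhile_append_dropWhile
      have hhead_dw : ∀ x, (ls'.dropWhile (fun x => !uscB_isDirective x)).head? = some x →
          uscB_isDirective x = true := by
        intro x hx
        have := uscHead_dropWhile hx
        simpa using this
      have hlen : (ls'.dropWhile (fun x => !uscB_isDirective x)).length ≤ n := by
        have := List.length_dropWhile_le (fun x => !uscB_isDirective x) ls'
        simp only [List.length_cons] at hn; omega
      rw [uscDirSegs, List.foldl_cons]
      by_cases hm : (PySem.Str.strip l == t) = true
      · rw [if_pos (by simpa using hm)]
        rw [ih _ (acc ++ [nb, ""]) true hlen hhead_dw]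
        rw [uscCanon, if_pos (by simp [hd, hm])]
        simp only [uscAny, List.any_cons, hd, hm]
        simp
      · rw [if_neg (by simpa using hm)]
        rw [ih _ (acc ++ (l :: ls'.takeWhile (fun x => !uscB_isDirective x))) found hlen hhead_dw]
        rw [uscCanon, if_neg (by simp [hm])]
        conv_rhs => rw [← hsplit]
        simp only [uscAny, List.any_cons, hcform.1]
        simp only [List.append_assoc]
        have h2 := hcform.2
        simp only [uscAny] at h2
        rw [hsplit]
        conv_rhs => rw [← hsplit]
        rw [h2]
        simp [hm]

-- ===== VERDICT (by name: the statement is the Claim_ definition above) =====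
theorem update_ssh_config_py_spec : Claim_equal_update_ssh_config_py := by
  intro old_config host new_block _
  unfold Spec_update_ssh_config_py update_ssh_config_py update_ssh_config_py_alt
  dsimp only
  have hA := uscA_loop_eq (PySem.Str.splitlines old_config) new_block ("Host " ++ host)
    (PySem.Str.splitlines old_config).length 0 [] false (by omega)
  rw [List.drop_zero] at hA
  simp only [List.nil_append, Bool.false_or] at hA
  have hseg := uscB_segment_eq (PySem.Str.splitlines old_config) [] []
  have hnd : ∀ x ∈ (PySem.Str.splitlines old_config).takeWhile (fun x => !uscB_isDirective x),
      uscB_isDirective x = false := by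
    intro x hx
    have := List.mem_takeWhile_imp hx
    simpa using this
  have hsplit : (PySem.Str.splitlines old_config).takeWhile (fun x => !uscB_isDirective x)
      ++ (PySem.Str.splitlines old_config).dropWhile (fun x => !uscB_isDirective x)
      = PySem.Str.splitlines old_config :=
    List.takeWhile_append_dropWhile
  have hcf := uscCanon_nondir_append new_block ("Host " ++ host)
    ((PySem.Str.splitlines old_config).takeWhile (fun x => !uscB_isDirective x))
    ((PySem.Str.splitlines old_config).dropWhile (fun x => !uscB_isDirective x)) hnd
  have hhead_dw : ∀ x,
      ((PySem.Str.splitlines old_config).dropWhile (fun x => !uscB_isDirective x)).head? = some x →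
      uscB_isDirective x = true := by
    intro x hx
    have := uscHead_dropWhile hx
    simpa using this
  have hfold := uscB_fold_eq new_block ("Host " ++ host)
    ((PySem.Str.splitlines old_config).dropWhile (fun x => !uscB_isDirective x)).length
    ((PySem.Str.splitlines old_config).dropWhile (fun x => !uscB_isDirective x))
    ((PySem.Str.splitlines old_config).takeWhile (fun x => !uscB_isDirective x))
    false le_rfl hhead_dw
  have hc1 : uscCanon new_block ("Host " ++ host) (PySem.Str.splitlines old_config)
      = (PySem.Str.splitlines old_config).takeWhile (fun x => !uscB_isDirective x)
        ++ uscCanon new_block ("Host " ++ host)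
            ((PySem.Str.splitlines old_config).dropWhile (fun x => !uscB_isDirective x)) := by
    conv_lhs => rw [← hsplit]
    exact hcf.1
  have hc2 : uscAny ("Host " ++ host) (PySem.Str.splitlines old_config)
      = uscAny ("Host " ++ host)
          ((PySem.Str.splitlines old_config).dropWhile (fun x => !uscB_isDirective x)) := by
    conv_lhs => rw [← hsplit]
    exact hcf.2
  rw [hA, hseg, hc1, hc2]
  simp only [List.nil_append, List.headD_cons, List.drop_succ_cons, List.drop_zero]
  rw [hfold]
  simp only [Bool.false_or]
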